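-- pv_equiv track=rewrite | github.com/aadipatodia/AI-Task-Manager | engine.py | should_send_whatsapp
-- ===== SOURCE A (Python) =====
-- def should_send_whatsapp(text: str) -> bool:
--
--     if not text:
--         return False
--
--     block_keywords = [
--         "api error",
--         "system error",
--         "failed",
--         "error",
--         "exception",
--         "invalid",
--         "update failed",
--         "unable to"
--     ]
--
--     t = text.lower()
--     return not any(k in t for k in block_keywords)
-- ===== SOURCE B (Python) =====
-- def should_send_whatsapp(text: str) -> bool:
--     if not text:
--         return False
--     # minimal blocklist: "api error", "system error", "update failed" are
--     # already covered by "error" / "failed", so they are dropped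
--     bad = ("failed", "error", "exception", "invalid", "unable to")
--     t = text.lower()
--     # explicit cursor loop: advance one position at a time; bail out as soon
--     # as some minimal keyword starts at the cursor
--     i = 0
--     n = len(t)
--     while i < n:
--         for k in bad:
--             if t.startswith(k, i):
--                 return False
--         i += 1
--     return True
-- ===== Notes on version B (the rewrite author's own statement) =====
-- stated objective: alternative
-- what changed: B drops the three compound blocklist entries that already contain another entry as a substring, leaving 5 minimal keywords, and replaces the per-keyword substring search with a single cursor walk over the lowered text that returns False as soon as any minimal keyword starts at the cursor.
import Mathlib
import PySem

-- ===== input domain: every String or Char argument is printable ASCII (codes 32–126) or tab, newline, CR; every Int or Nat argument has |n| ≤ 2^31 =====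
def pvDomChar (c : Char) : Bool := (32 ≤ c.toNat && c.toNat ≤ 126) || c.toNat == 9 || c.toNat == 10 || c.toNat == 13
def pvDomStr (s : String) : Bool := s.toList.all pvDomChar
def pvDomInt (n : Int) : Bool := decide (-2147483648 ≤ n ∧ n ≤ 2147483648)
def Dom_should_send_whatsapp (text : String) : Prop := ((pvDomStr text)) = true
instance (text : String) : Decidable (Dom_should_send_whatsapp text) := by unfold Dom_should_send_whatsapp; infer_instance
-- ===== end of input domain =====

-- B: same result by a different route — the blocklist is reduced to its 5 minimal
-- keywords and the per-keyword substring search becomes one early-exit cursor walk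
-- (structural recursion) over the lowered text.

-- ===== PORT A =====
def pvBlockKeywords : List String :=
  ["api error", "system error", "failed", "error", "exception", "invalid",
   "update failed", "unable to"]

def should_send_whatsapp (text : String) : Bool :=
  if text.toList = [] then false
  else
    let t := PySem.Str.lower text
    !(pvBlockKeywords.any (fun k => PySem.Str.isIn k t))

-- ===== PORT B =====
def pvBadWords : List String := ["failed", "error", "exception", "invalid", "unable to"]

/-- the cursor walk of Source B: step one char at a time; false as soon as a
    minimal keyword starts at the cursor. -/
def pvClean : List Char → Bool
  | [] => true
  | c :: cs =>
    if pvBadWords.any (fun k => List.isPrefixOf k.toList (c :: cs)) then false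
    else pvClean cs

def should_send_whatsapp_alt (text : String) : Bool :=
  match text.toList with
  | [] => false
  | c :: cs => pvClean (PySem.Chars.lower (c :: cs))

-- ===== PRECONDITION & SPEC =====
def Spec_should_send_whatsapp (text : String) (out : Bool) : Prop := out = should_send_whatsapp_alt text
instance (text : String) (out : Bool) : Decidable (Spec_should_send_whatsapp text out) := by unfold Spec_should_send_whatsapp; infer_instance

-- ===== CLAIM (what is proved, stated in full; the proofs are below) =====
def Claim_equal_should_send_whatsapp : Prop := ∀ (text : String), Dom_should_send_whatsapp text → Spec_should_send_whatsapp text (should_send_whatsapp text)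

-- ===== LEMMAS AND PROOFS =====

/-- The cursor walk succeeds iff no minimal keyword occurs as an infix. -/
lemma pvClean_eq_true_iff (L : List Char) :
    pvClean L = true ↔ ∀ k ∈ pvBadWords, ¬ k.toList <:+: L := by
  induction L with
  | nil =>
    simp only [pvClean, true_iff]
    intro k hk h
    have : k.toList = [] := List.eq_nil_of_infix_nil h
    simp only [pvBadWords, List.mem_cons, List.not_mem_nil, or_false] at hk
    rcases hk with rfl | rfl | rfl | rfl | rfl <;> simp at this
  | cons c cs ih =>
    rw [pvClean]
    split_ifs with h
    · simp only [false_iff, not_forall]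
      obtain ⟨k, hk, hp⟩ := List.any_eq_true.1 h
      exact ⟨k, hk, by simpa using (List.isPrefixOf_iff_prefix.1 hp).isInfix⟩
    · rw [ih]
      simp only [List.any_eq_false, Bool.not_eq_true] at h
      constructor
      · intro hcs k hk hinf
        rcases List.infix_cons_iff.1 hinf with hpre | hinf'
        · have hx := h k hk
          rw [Bool.eq_false_iff, ne_eq, List.isPrefixOf_iff_prefix] at hx
          exact hx hpre
        · exact hcs k hk hinf'
      · intro hall k hk hinf
        exact hall k hk (hinf.trans (List.infix_cons_iff.2 (Or.inr (List.infix_refl cs))))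

/-- The three compound keywords are subsumed by "error" / "failed": searching the
    8-element blocklist finds a hit iff searching the 5 minimal keywords does. -/
lemma eight_iff_five (L : List Char) :
    (∃ k ∈ pvBlockKeywords, k.toList <:+: L) ↔ ∃ k ∈ pvBadWords, k.toList <:+: L := by
  constructor
  · rintro ⟨k, hk, h⟩
    simp only [pvBlockKeywords, List.mem_cons, List.not_mem_nil, or_false] at hk
    rcases hk with rfl | rfl | rfl | rfl | rfl | rfl | rfl | rfl
    · exact ⟨"error", by simp [pvBadWords], (show "error".toList <:+: "api error".toList by decide).trans h⟩
    · exact ⟨"error", by simp [pvBadWords], (show "error".toList <:+: "system error".toList by decide).trans h⟩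
    · exact ⟨"failed", by simp [pvBadWords], h⟩
    · exact ⟨"error", by simp [pvBadWords], h⟩
    · exact ⟨"exception", by simp [pvBadWords], h⟩
    · exact ⟨"invalid", by simp [pvBadWords], h⟩
    · exact ⟨"failed", by simp [pvBadWords], (show "failed".toList <:+: "update failed".toList by decide).trans h⟩
    · exact ⟨"unable to", by simp [pvBadWords], h⟩
  · rintro ⟨k, hk, h⟩
    refine ⟨k, ?_, h⟩
    simp only [pvBadWords, List.mem_cons, List.not_mem_nil, or_false] at hk
    rcases hk with rfl | rfl | rfl | rfl | rfl <;> simp [pvBlockKeywords]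

theorem should_send_whatsapp_spec : Claim_equal_should_send_whatsapp := by
  intro text _
  unfold Spec_should_send_whatsapp should_send_whatsapp should_send_whatsapp_alt
  cases hL : text.toList with
  | nil => simp
  | cons c cs =>
    simp only [reduceCtorEq, if_false]
    rw [Bool.eq_iff_iff]
    have hlow : (PySem.Str.lower text).toList = PySem.Chars.lower (c :: cs) := by
      rw [PySem.Str.toList_lower, hL]
    simp only [Bool.not_eq_eq_eq_not, Bool.not_true, List.any_eq_false,
      PySem.Str.isIn_iff_infix, hlow, pvClean_eq_true_iff]
    constructor
    · intro h8 k hk hinf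
      obtain ⟨k', hk', h'⟩ := (eight_iff_five _).2 ⟨k, hk, hinf⟩
      exact h8 k' hk' h'
    · intro h5 k hk hinf
      obtain ⟨k', hk', h'⟩ := (eight_iff_five _).1 ⟨k, hk, hinf⟩
      exact h5 k' hk' h'
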